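-- pv_equiv track=rewrite | github.com/thecommercialguy/PoemScraper | definitionsScrape.py | remove_definition_reference
-- ===== SOURCE A (Python) =====
-- def remove_definition_reference(definition: str):
--     definiton_parts = definition.split(' ')
--
--     delete_id = 'delete-me'
--     delete_id_has_comma = 'delete-me-comma'
--
--     i = 0
--     start_string = '(see'
--     # for part in definiton_parts:
--     while i < len(definiton_parts):
--         if definiton_parts[i] == start_string:
--             definiton_parts[i] = delete_id
--             j = i + 1
--             while ')' not in definiton_parts[j]:
--                 definiton_parts[j] = delete_id
--                 j += 1
--             if ',' in definiton_parts[j]: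
--                 definiton_parts[j] = delete_id_has_comma
--             else:
--                 definiton_parts[j] = delete_id
--
--             i = j
--         i += 1
--
--     definiton_parts_cleaned = []
--     for i in range(len(definiton_parts)):
--         part = definiton_parts[i]
--         if part == delete_id_has_comma:
--             definiton_parts_cleaned[-1] = definiton_parts_cleaned[-1] + ','
--         if part != delete_id and part != delete_id_has_comma:
--             definiton_parts_cleaned.append(part)
--
--
--     return ' '.join(definiton_parts_cleaned)
-- ===== SOURCE B (Python) =====
-- # One fused pass over the space-split tokens: skip each "(see ... )" region directly while building the
-- # output list, instead of A's two phases with in-band "delete-me" sentinel rewriting.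
-- def remove_definition_reference(definition: str):
--     parts = definition.split(' ')
--     result = []
--     i = 0
--     while i < len(parts):
--         token = parts[i]
--         if token == '(see':
--             j = i + 1
--             while ')' not in parts[j]:
--                 j += 1
--             if ',' in parts[j]:
--                 result[-1] = result[-1] + ','
--             i = j + 1
--         else:
--             result.append(token)
--             i += 1
--     return ' '.join(result)
-- ===== Notes on version B (the rewrite author's own statement) =====
-- stated objective: simpler
-- what changed: B removes '(see ...)' regions in one fused pass that builds the output list directly, replacing A's two-phase algorithm that first overwrites tokens with in-band 'delete-me'/'delete-me-comma' sentinel strings and then filters them out.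
-- intended difference: On inputs containing a literal space-split token 'delete-me' or 'delete-me-comma' outside any '(see ...)' region, A's in-band sentinels collide with the input and A silently drops the token (or splices a comma onto the previous kept token), e.g. A('a delete-me b')='a b', while B keeps such ordinary text verbatim ('a delete-me b'), which is the intended behaviour. — e.g. on remove_definition_reference("a delete-me b"): A returns "a b", B returns "a delete-me b"
import Mathlib
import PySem

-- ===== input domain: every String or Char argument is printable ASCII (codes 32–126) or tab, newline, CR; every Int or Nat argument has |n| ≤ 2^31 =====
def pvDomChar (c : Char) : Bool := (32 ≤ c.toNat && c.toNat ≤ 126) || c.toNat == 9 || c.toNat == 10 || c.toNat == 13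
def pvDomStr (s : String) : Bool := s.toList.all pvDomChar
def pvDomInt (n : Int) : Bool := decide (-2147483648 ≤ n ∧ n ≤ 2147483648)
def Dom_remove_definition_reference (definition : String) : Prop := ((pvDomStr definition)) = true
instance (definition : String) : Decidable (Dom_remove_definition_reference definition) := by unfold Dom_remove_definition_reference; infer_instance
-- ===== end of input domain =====

-- B replaces A's two-phase sentinel-rewriting removal of "(see ...)" regions by one fused pass
-- building the output directly (objective: simpler).  Tokens are List Char (PySem.Chars level);
-- the while loops carry a fuel parameter (always sufficient: every step consumes ≥ 1 token).

-- the literal strings both Pythons compare tokens against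
def seeTok : List Char := "(see".toList
def dmTok : List Char := "delete-me".toList
def dmcTok : List Char := "delete-me-comma".toList

-- cleaned[-1] = cleaned[-1] + ','  (both Pythons perform exactly this; none = IndexError on [])
def pyAppendCommaLast? (l : List (List Char)) : Option (List (List Char)) :=
  match l.getLast? with
  | none => none
  | some x => some (l.dropLast ++ [x ++ [',']])

-- ===== PORT A =====
-- A's inner while loop from index i+1: overwrites every token without ')' by "delete-me" and
-- stops at the first token containing ')'; none = IndexError (ran off the end).
def aInner : List (List Char) → Option (List (List Char) × List Char × List (List Char))
  | [] => none
  | t :: rest =>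
    if PySem.Chars.isIn [')'] t then some ([], t, rest)
    else match aInner rest with
      | none => none
      | some (mids, c, after) => some (dmTok :: mids, c, after)

-- A's outer while loop as a zipper over the (mutated) token list: the loop only reads and writes
-- at indices ≥ i and restarts at j+1, so the processed prefix is emitted and the scan goes on
-- over the suffix.  none = IndexError from the inner loop; fuel ≥ tokens + 1 is always enough.
def aMark : Nat → List (List Char) → Option (List (List Char))
  | 0, _ => none
  | _ + 1, [] => some []
  | fuel + 1, t :: rest =>
    if t = seeTok then
      match aInner rest with
      | none => none
      | some (mids, c, after) =>
        match aMark fuel after with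
        | none => none
        | some tail =>
          some (dmTok :: mids ++ (if PySem.Chars.isIn [','] c then dmcTok else dmTok) :: tail)
    else
      match aMark fuel rest with
      | none => none
      | some tail => some (t :: tail)

-- A's second for loop: drop sentinels, splice a ',' onto the last kept token at the comma
-- sentinel; none = IndexError (cleaned[-1] on an empty list).
def aClean : List (List Char) → List (List Char) → Option (List (List Char))
  | cleaned, [] => some cleaned
  | cleaned, part :: rest =>
    if part = dmcTok then
      match pyAppendCommaLast? cleaned with
      | none => none
      | some cleaned' => aClean cleaned' rest
    else if part = dmTok then aClean cleaned rest
    else aClean (cleaned ++ [part]) rest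

def remove_definition_reference (definition : String) : String :=
  let parts := PySem.Chars.splitOn definition.toList [' ']
  match aMark (parts.length + 1) parts with
  | none => ""            -- IndexError (excluded by Pre_)
  | some marked =>
    match aClean [] marked with
    | none => ""          -- IndexError (excluded by Pre_)
    | some cleaned => String.ofList (PySem.Chars.join [' '] cleaned)

-- ===== PORT B =====
-- B's inner while loop: find the first token containing ')'; none = IndexError.
def bFindClose : List (List Char) → Option (List Char × List (List Char))
  | [] => none
  | t :: rest => if PySem.Chars.isIn [')'] t then some (t, rest) else bFindClose rest

-- B's single pass: append ordinary tokens; on "(see" skip past the closing token, splicing a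
-- comma onto the last kept token when the closer contains ','; fuel ≥ tokens + 1 always enough.
def bScan : Nat → List (List Char) → List (List Char) → Option (List (List Char))
  | 0, _, _ => none
  | _ + 1, result, [] => some result
  | fuel + 1, result, t :: rest =>
    if t = seeTok then
      match bFindClose rest with
      | none => none
      | some (c, after) =>
        if PySem.Chars.isIn [','] c then
          match pyAppendCommaLast? result with
          | none => none
          | some result' => bScan fuel result' after
        else bScan fuel result after
    else bScan fuel (result ++ [t]) rest

def remove_definition_reference_alt (definition : String) : String :=
  let parts := PySem.Chars.splitOn definition.toList [' ']
  match bScan (parts.length + 1) [] parts with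
  | none => ""            -- IndexError (excluded by Pre_)
  | some result => String.ofList (PySem.Chars.join [' '] result)

-- ===== PRECONDITION & SPEC =====
-- helpers of Pre_/D_ only (independent of both ports):
-- every "(see" token is followed by some token containing ')' (else A's inner while raises IndexError)
def pvOk1 : List (List Char) → Bool
  | [] => true
  | t :: rest =>
    (if t = "(see".toList then rest.any (fun s => PySem.Chars.isIn [')'] s) else true) && pvOk1 rest

-- state machine over the tokens: while nothing has been kept yet, removed material ("delete-me"-like
-- tokens, "(see ...)" regions) must not splice a comma (else cleaned[-1] raises IndexError);
-- inRegion = currently inside an unclosed "(see ...)" region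
def pvOk2 (inRegion : Bool) : List (List Char) → Bool
  | [] => true
  | t :: rest =>
    if inRegion then
      if PySem.Chars.isIn [')'] t then
        if PySem.Chars.isIn [','] t then false else pvOk2 false rest
      else pvOk2 true rest
    else
      if t = "delete-me".toList then pvOk2 false rest
      else if t = "delete-me-comma".toList then false
      else if t = "(see".toList then pvOk2 true rest
      else true

-- Pre_ excludes exactly the inputs on which Python A raises IndexError: an unclosed "(see", or a
-- comma closer (or a literal "delete-me-comma" token) reached before any token has been kept.
def Pre_remove_definition_reference (definition : String) : Prop :=
  pvOk1 (PySem.Chars.splitOn definition.toList [' ']) = true ∧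
  pvOk2 false (PySem.Chars.splitOn definition.toList [' ']) = true
instance (definition : String) : Decidable (Pre_remove_definition_reference definition) := by
  unfold Pre_remove_definition_reference; infer_instance

def pvWitness_remove_definition_reference : String := "a (see b) c"

-- state machine over the tokens: is there a literal "delete-me"/"delete-me-comma" token OUTSIDE
-- every "(see ...)" region?  (inside a region A overwrites it anyway, so only free ones matter)
def pvFreeSentinel (inRegion : Bool) : List (List Char) → Bool
  | [] => false
  | t :: rest =>
    if inRegion then
      if PySem.Chars.isIn [')'] t then pvFreeSentinel false rest else pvFreeSentinel true rest
    else
      if t = "delete-me".toList ∨ t = "delete-me-comma".toList then true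
      else if t = "(see".toList then pvFreeSentinel true rest
      else pvFreeSentinel false rest

-- On inputs containing a literal token "delete-me" or "delete-me-comma" outside any "(see ...)"
-- region, A's in-band sentinels collide with the input and A silently drops the token (or splices
-- a comma); B keeps such ordinary text verbatim, which is the intended behaviour.
def D_remove_definition_reference (definition : String) : Prop :=
  pvFreeSentinel false (PySem.Chars.splitOn definition.toList [' ']) = true
instance (definition : String) : Decidable (D_remove_definition_reference definition) := by
  unfold D_remove_definition_reference; infer_instance

def Spec_remove_definition_reference (definition : String) (out : String) : Prop :=
  ¬ D_remove_definition_reference definition → out = remove_definition_reference_alt definition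
instance (definition : String) (out : String) : Decidable (Spec_remove_definition_reference definition out) := by
  unfold Spec_remove_definition_reference; infer_instance

def pvDiffWitness_remove_definition_reference : String := "a delete-me b"
def pvDiffWitnessOut_remove_definition_reference : String × String := ("a b", "a delete-me b")

-- ===== CLAIM (what is proved, stated in full; the proofs are below) =====
def Claim_unchanged_remove_definition_reference : Prop := ∀ (definition : String), Dom_remove_definition_reference definition → Pre_remove_definition_reference definition → Spec_remove_definition_reference definition (remove_definition_reference definition)
def Claim_changed_remove_definition_reference : Prop := Dom_remove_definition_reference (pvDiffWitness_remove_definition_reference) ∧ Pre_remove_definition_reference (pvDiffWitness_remove_definition_reference) ∧ D_remove_definition_reference (pvDiffWitness_remove_definition_reference) ∧ remove_definition_reference (pvDiffWitness_remove_definition_reference) = pvDiffWitnessOut_remove_definition_reference.1 ∧ remove_definition_reference_alt (pvDiffWitness_remove_definition_reference) = pvDiffWitnessOut_remove_definition_reference.2 ∧ pvDiffWitnessOut_remove_definition_reference.1 ≠ pvDiffWitnessOut_remove_definition_reference.2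
def Claim_exact_remove_definition_reference : Prop := ∀ (definition : String), Dom_remove_definition_reference definition → Pre_remove_definition_reference definition → D_remove_definition_reference definition → remove_definition_reference definition ≠ remove_definition_reference_alt definition

-- ===== LEMMAS AND PROOFS =====

-- one-step unfolding (definitional) ------------------------------------------------------------

theorem aMark_cons (fuel : Nat) (t : List Char) (rest : List (List Char)) :
    aMark (fuel + 1) (t :: rest) =
      if t = seeTok then
        match aInner rest with
        | none => none
        | some (mids, c, after) =>
          match aMark fuel after with
          | none => none
          | some tail =>
            some (dmTok :: mids ++ (if PySem.Chars.isIn [','] c then dmcTok else dmTok) :: tail)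
      else
        match aMark fuel rest with
        | none => none
        | some tail => some (t :: tail) := rfl

theorem bScan_cons (fuel : Nat) (result : List (List Char)) (t : List Char)
    (rest : List (List Char)) :
    bScan (fuel + 1) result (t :: rest) =
      if t = seeTok then
        match bFindClose rest with
        | none => none
        | some (c, after) =>
          if PySem.Chars.isIn [','] c then
            match pyAppendCommaLast? result with
            | none => none
            | some result' => bScan fuel result' after
          else bScan fuel result after
      else bScan fuel (result ++ [t]) rest := rfl

theorem aClean_cons (acc : List (List Char)) (part : List Char) (rest : List (List Char)) :
    aClean acc (part :: rest) =
      if part = dmcTok then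
        match pyAppendCommaLast? acc with
        | none => none
        | some acc' => aClean acc' rest
      else if part = dmTok then aClean acc rest
      else aClean (acc ++ [part]) rest := rfl

theorem pvOk1_cons (t : List Char) (rest : List (List Char)) :
    pvOk1 (t :: rest) =
      ((if t = seeTok then rest.any (fun s => PySem.Chars.isIn [')'] s) else true) && pvOk1 rest) := rfl

theorem pvOk2_cons (inR : Bool) (t : List Char) (rest : List (List Char)) :
    pvOk2 inR (t :: rest) =
      if inR then
        if PySem.Chars.isIn [')'] t then
          if PySem.Chars.isIn [','] t then false else pvOk2 false rest
        else pvOk2 true rest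
      else
        if t = dmTok then pvOk2 false rest
        else if t = dmcTok then false
        else if t = seeTok then pvOk2 true rest
        else true := rfl

theorem pvFS_cons (inR : Bool) (t : List Char) (rest : List (List Char)) :
    pvFreeSentinel inR (t :: rest) =
      if inR then
        if PySem.Chars.isIn [')'] t then pvFreeSentinel false rest else pvFreeSentinel true rest
      else
        if t = dmTok ∨ t = dmcTok then true
        else if t = seeTok then pvFreeSentinel true rest
        else pvFreeSentinel false rest := rfl

-- aClean steps ---------------------------------------------------------------------------------

theorem aClean_dm (acc rest : List (List Char)) :
    aClean acc (dmTok :: rest) = aClean acc rest := by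
  rw [aClean_cons, if_neg (by decide : ¬ dmTok = dmcTok), if_pos rfl]

theorem aClean_dmc (acc rest : List (List Char)) :
    aClean acc (dmcTok :: rest) =
      match pyAppendCommaLast? acc with
      | none => none
      | some acc' => aClean acc' rest := by
  rw [aClean_cons, if_pos rfl]

theorem aClean_ordinary {t : List Char} (acc rest : List (List Char))
    (h1 : t ≠ dmTok) (h2 : t ≠ dmcTok) :
    aClean acc (t :: rest) = aClean (acc ++ [t]) rest := by
  rw [aClean_cons, if_neg h2, if_neg h1]

-- aClean skips the block of "delete-me" middles produced for a "(see ...)" region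
theorem aClean_block (mids : List (List Char)) (hm : ∀ x ∈ mids, x = dmTok)
    (mk : List Char) (acc tail : List (List Char)) :
    aClean acc (dmTok :: mids ++ mk :: tail) = aClean acc (mk :: tail) := by
  induction mids generalizing acc with
  | nil => exact aClean_dm acc (mk :: tail)
  | cons x xs ih =>
    have hx : x = dmTok := hm x (by simp)
    subst hx
    exact (aClean_dm acc ((dmTok :: xs) ++ (mk :: tail))).trans
      (ih (fun y hy => hm y (by simp [hy])) acc)

-- aInner facts ---------------------------------------------------------------------------------

-- aInner's successful result decomposes the list at the first token containing ')', with all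
-- overwritten middles equal to "delete-me", and agrees with bFindClose.
theorem aInner_spec {l : List (List Char)} {m : List (List Char)} {c : List Char}
    {a : List (List Char)} (h : aInner l = some (m, c, a)) :
    bFindClose l = some (c, a) ∧ (∀ x ∈ m, x = dmTok) ∧
      ∃ pre, l = pre ++ c :: a ∧ (∀ x ∈ pre, PySem.Chars.isIn [')'] x = false) ∧
        PySem.Chars.isIn [')'] c = true := by
  induction l generalizing m c a with
  | nil => simp [aInner] at h
  | cons t rest ih =>
    simp only [aInner] at h
    by_cases hc : PySem.Chars.isIn [')'] t = true
    · rw [if_pos hc] at h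
      simp only [Option.some.injEq, Prod.mk.injEq] at h
      obtain ⟨rfl, rfl, rfl⟩ := h
      exact ⟨by simp [bFindClose, hc], by simp, [], by simp, by simp, hc⟩
    · rw [if_neg hc] at h
      cases hr : aInner rest with
      | none => rw [hr] at h; simp at h
      | some v =>
        obtain ⟨m', c', a'⟩ := v
        rw [hr] at h
        simp only [Option.some.injEq, Prod.mk.injEq] at h
        obtain ⟨rfl, rfl, rfl⟩ := h
        obtain ⟨h1, h2, pre, hdec, hpre, hcc⟩ := ih hr
        refine ⟨by simp only [bFindClose, if_neg hc]; exact h1, ?_, t :: pre, by simp [hdec], ?_, hcc⟩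
        · intro x hx
          rcases List.mem_cons.mp hx with rfl | hx
          · rfl
          · exact h2 x hx
        · intro x hx
          rcases List.mem_cons.mp hx with rfl | hx
          · exact Bool.not_eq_true _ ▸ (by simpa using hc)
          · exact hpre x hx

theorem aInner_of_any {l : List (List Char)}
    (h : l.any (fun s => PySem.Chars.isIn [')'] s) = true) :
    ∃ m c a, aInner l = some (m, c, a) := by
  induction l with
  | nil => simp at h
  | cons t rest ih =>
    by_cases hc : PySem.Chars.isIn [')'] t = true
    · exact ⟨[], t, rest, by simp [aInner, hc]⟩
    · have h' : rest.any (fun s => PySem.Chars.isIn [')'] s) = true := by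
        simp only [List.any_cons, Bool.or_eq_true] at h
        rcases h with h | h
        · exact absurd h hc
        · exact h
      obtain ⟨m, c, a, hm⟩ := ih h'
      exact ⟨dmTok :: m, c, a, by simp [aInner, hc, hm]⟩

-- pvOk1 is hereditary for suffixes
theorem pvOk1_suffix : ∀ (xs ys : List (List Char)), pvOk1 (xs ++ ys) = true → pvOk1 ys = true := by
  intro xs
  induction xs with
  | nil => intro ys h; exact h
  | cons x r ih =>
    intro ys h
    rw [List.cons_append, pvOk1_cons, Bool.and_eq_true] at h
    exact ih ys h.2

-- stepping the two state machines through a closed region -------------------------------------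

theorem pvFS_through (pre : List (List Char)) (hpre : ∀ x ∈ pre, PySem.Chars.isIn [')'] x = false)
    (c : List Char) (hc : PySem.Chars.isIn [')'] c = true) (after : List (List Char)) :
    pvFreeSentinel true (pre ++ c :: after) = pvFreeSentinel false after := by
  induction pre with
  | nil => rw [List.nil_append, pvFS_cons, if_pos rfl, if_pos hc]
  | cons x xs ih =>
    rw [List.cons_append, pvFS_cons, if_pos rfl,
      if_neg (by simp [hpre x (by simp)])]
    exact ih (fun y hy => hpre y (by simp [hy]))

theorem pvOk2_through (pre : List (List Char)) (hpre : ∀ x ∈ pre, PySem.Chars.isIn [')'] x = false)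
    (c : List Char) (hc : PySem.Chars.isIn [')'] c = true) (after : List (List Char)) :
    pvOk2 true (pre ++ c :: after) =
      if PySem.Chars.isIn [','] c then false else pvOk2 false after := by
  induction pre with
  | nil => rw [List.nil_append, pvOk2_cons, if_pos rfl, if_pos hc]
  | cons x xs ih =>
    rw [List.cons_append, pvOk2_cons, if_pos rfl,
      if_neg (by simp [hpre x (by simp)])]
    exact ih (fun y hy => hpre y (by simp [hy]))

-- token-list weight: joined length + 1 ---------------------------------------------------------

def pvW (l : List (List Char)) : Nat := (l.map (fun t => t.length + 1)).sum

theorem pvW_nil : pvW [] = 0 := rfl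

theorem pvW_cons (t : List Char) (l : List (List Char)) :
    pvW (t :: l) = t.length + 1 + pvW l := by
  simp [pvW]

theorem pvW_append (a b : List (List Char)) : pvW (a ++ b) = pvW a + pvW b := by
  simp [pvW]

theorem pvW_pos {l : List (List Char)} (h : l ≠ []) : 1 ≤ pvW l := by
  cases l with
  | nil => exact absurd rfl h
  | cons t r => rw [pvW_cons]; omega

theorem pac_spec {l : List (List Char)} (h : l ≠ []) :
    ∃ l', pyAppendCommaLast? l = some l' ∧ pvW l' = pvW l + 1 ∧ l' ≠ [] := by
  have hg : l.getLast? = some (l.getLast h) := List.getLast?_eq_some_getLast h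
  refine ⟨l.dropLast ++ [l.getLast h ++ [',']], ?_, ?_, by simp⟩
  · unfold pyAppendCommaLast?
    rw [hg]
  · conv_rhs => rw [← List.dropLast_concat_getLast h]
    rw [pvW_append, pvW_append, pvW_cons, pvW_cons, pvW_nil]
    simp
    omega

theorem join_space_len : ∀ (l : List (List Char)), l ≠ [] →
    (PySem.Chars.join [' '] l).length + 1 = pvW l := by
  intro l
  induction l with
  | nil => intro h; exact absurd rfl h
  | cons x r ih =>
    intro _
    cases r with
    | nil => rw [PySem.Chars.join_singleton, pvW_cons, pvW_nil]
    | cons y s =>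
      rw [PySem.Chars.join_cons_cons, pvW_cons, ← ih (by simp)]
      simp
      omega

-- the core simulation: under pvOk1 (all "(see" regions closed) both pipelines succeed; their
-- outputs are weight-equal when accumulators are, strictly heavier on B's side once a free
-- sentinel occurs, and literally equal when there is no free sentinel.
theorem simT : ∀ n (l : List (List Char)), l.length < n → pvOk1 l = true →
    ∀ accA accB, pvW accA ≤ pvW accB →
    (accA = [] → pvOk2 false l = true) →
    ∃ la lb,
      (match aMark n l with
       | none => none
       | some m => aClean accA m) = some la ∧
      bScan n accB l = some lb ∧
      pvW accB + pvW la ≤ pvW accA + pvW lb ∧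
      (pvFreeSentinel false l = true → pvW accB + pvW la + 10 ≤ pvW accA + pvW lb) ∧
      (accA = accB → pvFreeSentinel false l = false → la = lb) := by
  intro n
  induction n with
  | zero => intro l hl; simp at hl
  | succ n ih =>
    intro l hl hok1 accA accB hW hinv
    cases l with
    | nil =>
      exact ⟨accA, accB, rfl, rfl, by omega,
        fun h => by simp [pvFreeSentinel] at h, fun he _ => he⟩
    | cons t rest =>
      rw [pvOk1_cons, Bool.and_eq_true] at hok1
      obtain ⟨hok1h, hok1rest⟩ := hok1
      rw [aMark_cons, bScan_cons]
      by_cases hsee : t = seeTok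
      · -- a "(see ...)" region: both sides skip it, splicing a comma when the closer has one
        subst hsee
        rw [if_pos rfl] at hok1h
        rw [if_pos rfl]
        rw [if_pos rfl]
        obtain ⟨mids, c, after, hin⟩ := aInner_of_any hok1h
        obtain ⟨hfind, hmids, pre, hdec, hpre, hc⟩ := aInner_spec hin
        simp only [hin, hfind]
        have hlrest : rest.length < n := by simp at hl; omega
        have hlen : after.length < n := by
          have : rest.length = pre.length + (after.length + 1) := by simp [hdec]
          omega
        have hok1after : pvOk1 after = true := by
          have h1 : pvOk1 ((pre ++ [c]) ++ after) = true := by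
            rw [show (pre ++ [c]) ++ after = pre ++ c :: after by simp, ← hdec]
            exact hok1rest
          exact pvOk1_suffix (pre ++ [c]) after h1
        have hFS : pvFreeSentinel false (seeTok :: rest) = pvFreeSentinel false after := by
          have h0 : pvFreeSentinel false (seeTok :: rest) = pvFreeSentinel true rest := rfl
          rw [h0, hdec, pvFS_through pre hpre c hc after]
        have hOK2 : pvOk2 false (seeTok :: rest) =
            if PySem.Chars.isIn [','] c then false else pvOk2 false after := by
          have h0 : pvOk2 false (seeTok :: rest) = pvOk2 true rest := rfl
          rw [h0, hdec, pvOk2_through pre hpre c hc after]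
        by_cases hcomma : PySem.Chars.isIn [','] c = true
        · -- comma closer: both splice onto the last kept token
          simp only [hcomma, if_true]
          have haccA : accA ≠ [] := by
            intro h0
            have := hinv h0
            rw [hOK2, if_pos hcomma] at this
            simp at this
          have haccB : accB ≠ [] := by
            intro h0
            have := pvW_pos haccA
            rw [h0, pvW_nil] at hW
            omega
          obtain ⟨accA', hpacA, hWA, hA'ne⟩ := pac_spec haccA
          obtain ⟨accB', hpacB, hWB, _⟩ := pac_spec haccB
          obtain ⟨la, lb, hha, hhb, h1, h2, h3⟩ :=
            ih after hlen hok1after accA' accB' (by omega) (fun h0 => absurd h0 hA'ne)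
          refine ⟨la, lb, ?_, ?_, by omega, ?_, ?_⟩
          · cases hmark : aMark n after with
            | none => rw [hmark] at hha; simp at hha
            | some tailm =>
              rw [hmark] at hha
              exact (aClean_block mids hmids dmcTok accA tailm).trans
                ((aClean_dmc accA tailm).trans (by rw [hpacA]; exact hha))
          · rw [hpacB]; exact hhb
          · intro hfs; rw [hFS] at hfs; have := h2 hfs; omega
          · intro he hfsf
            rw [hFS] at hfsf
            refine h3 ?_ hfsf
            rw [he] at hpacA
            rw [hpacA] at hpacB
            exact Option.some.inj hpacB
        · -- closer without comma: the region just disappears on both sides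
          have hc' : PySem.Chars.isIn [','] c = false := by simpa using hcomma
          simp only [hc', Bool.false_eq_true, if_false]
          have hinv' : accA = [] → pvOk2 false after = true := by
            intro h0
            have := hinv h0
            rw [hOK2, if_neg (by simp [hc'])] at this
            exact this
          obtain ⟨la, lb, hha, hhb, h1, h2, h3⟩ :=
            ih after hlen hok1after accA accB hW hinv'
          refine ⟨la, lb, ?_, hhb, h1, ?_, ?_⟩
          · cases hmark : aMark n after with
            | none => rw [hmark] at hha; simp at hha
            | some tailm =>
              rw [hmark] at hha
              exact (aClean_block mids hmids dmTok accA tailm).trans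
                ((aClean_dm accA tailm).trans hha)
          · intro hfs; rw [hFS] at hfs; exact h2 hfs
          · intro he hfsf; rw [hFS] at hfsf; exact h3 he hfsf
      · rw [if_neg hsee, if_neg hsee]
        have hlrest : rest.length < n := by simp at hl; omega
        by_cases hdmc : t = dmcTok
        · -- a free "delete-me-comma" token: A splices a comma, B keeps the token
          subst hdmc
          have haccA : accA ≠ [] := by
            intro h0
            have h1 := hinv h0
            have h2 : pvOk2 false (dmcTok :: rest) = false := rfl
            rw [h2] at h1
            simp at h1
          obtain ⟨accA', hpacA, hWA, hA'ne⟩ := pac_spec haccA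
          obtain ⟨la, lb, hha, hhb, h1, h2, h3⟩ :=
            ih rest hlrest hok1rest accA' (accB ++ [dmcTok])
              (by rw [pvW_append, pvW_cons, pvW_nil]; simp [dmcTok]; omega)
              (fun h0 => absurd h0 hA'ne)
          have hWB : pvW (accB ++ [dmcTok]) = pvW accB + 16 := by
            rw [pvW_append, pvW_cons, pvW_nil]; simp [dmcTok]
          have hFS : pvFreeSentinel false (dmcTok :: rest) = true := rfl
          refine ⟨la, lb, ?_, hhb, by omega, by omega, ?_⟩
          · cases hmark : aMark n rest with
            | none => rw [hmark] at hha; simp at hha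
            | some tailm =>
              rw [hmark] at hha
              exact (aClean_dmc accA tailm).trans (by rw [hpacA]; exact hha)
          · intro _ hfsf; rw [hFS] at hfsf; simp at hfsf
        by_cases hdm : t = dmTok
        · -- a free "delete-me" token: A drops it, B keeps it
          subst hdm
          have hinv' : accA = [] → pvOk2 false rest = true := by
            intro h0
            have h1 := hinv h0
            have h2 : pvOk2 false (dmTok :: rest) = pvOk2 false rest := rfl
            rw [h2] at h1
            exact h1
          obtain ⟨la, lb, hha, hhb, h1, h2, h3⟩ :=
            ih rest hlrest hok1rest accA (accB ++ [dmTok])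
              (by rw [pvW_append, pvW_cons, pvW_nil]; simp [dmTok]; omega)
              hinv'
          have hWB : pvW (accB ++ [dmTok]) = pvW accB + 10 := by
            rw [pvW_append, pvW_cons, pvW_nil]; simp [dmTok]
          have hFS : pvFreeSentinel false (dmTok :: rest) = true := rfl
          refine ⟨la, lb, ?_, hhb, by omega, by omega, ?_⟩
          · cases hmark : aMark n rest with
            | none => rw [hmark] at hha; simp at hha
            | some tailm =>
              rw [hmark] at hha
              exact (aClean_dm accA tailm).trans hha
          · intro _ hfsf; rw [hFS] at hfsf; simp at hfsf
        · -- an ordinary token: both keep it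
          obtain ⟨la, lb, hha, hhb, h1, h2, h3⟩ :=
            ih rest hlrest hok1rest (accA ++ [t]) (accB ++ [t])
              (by simp only [pvW_append, pvW_cons, pvW_nil]; omega)
              (by intro h0; simp at h0)
          have hFS : pvFreeSentinel false (t :: rest) = pvFreeSentinel false rest := by
            simp [pvFS_cons, hdm, hdmc, hsee]
          have hWt : pvW (accA ++ [t]) = pvW accA + (t.length + 1) := by
            rw [pvW_append, pvW_cons, pvW_nil]
          have hWt' : pvW (accB ++ [t]) = pvW accB + (t.length + 1) := by
            rw [pvW_append, pvW_cons, pvW_nil]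
          refine ⟨la, lb, ?_, hhb, by omega, ?_, ?_⟩
          · cases hmark : aMark n rest with
            | none => rw [hmark] at hha; simp at hha
            | some tailm =>
              rw [hmark] at hha
              exact (aClean_ordinary accA tailm hdm hdmc).trans hha
          · intro hfs; rw [hFS] at hfs; have := h2 hfs; omega
          · intro he hfsf; rw [hFS] at hfsf; exact h3 (by rw [he]) hfsf

-- ===== VERDICT (by name: the statement is the Claim_ definition above) =====
theorem remove_definition_reference_spec : Claim_unchanged_remove_definition_reference := by
  intro definition _ hPre hD
  show remove_definition_reference definition = remove_definition_reference_alt definition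
  unfold remove_definition_reference remove_definition_reference_alt
  set parts := PySem.Chars.splitOn definition.toList [' '] with hp
  obtain ⟨hok1, hok2⟩ := hPre
  have hflag : pvFreeSentinel false parts = false := by
    rw [hp]
    unfold D_remove_definition_reference at hD
    simpa using hD
  obtain ⟨la, lb, hA, hB, _, _, hEq⟩ :=
    simT (parts.length + 1) parts (by omega) hok1 [] [] le_rfl (fun _ => hok2)
  have hla : la = lb := hEq rfl hflag
  cases hm : aMark (parts.length + 1) parts with
  | none => rw [hm] at hA; simp at hA
  | some marked =>
    rw [hm] at hA
    have hA' : aClean [] marked = some la := hA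
    cases hb : bScan (parts.length + 1) [] parts with
    | none => rw [hb] at hB; simp at hB
    | some res =>
      have hres : res = lb := by rw [hb] at hB; exact Option.some.inj hB
      simp only [hm, hb, hA']
      rw [hres, hla]

theorem remove_definition_reference_changed : Claim_changed_remove_definition_reference := by
  unfold Claim_changed_remove_definition_reference; decide

theorem remove_definition_reference_tight : Claim_exact_remove_definition_reference := by
  intro definition _ hPre hD
  show remove_definition_reference definition ≠ remove_definition_reference_alt definition
  unfold remove_definition_reference remove_definition_reference_alt
  set parts := PySem.Chars.splitOn definition.toList [' '] with hp
  obtain ⟨hok1, hok2⟩ := hPre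
  obtain ⟨la, lb, hA, hB, _, hStrict, _⟩ :=
    simT (parts.length + 1) parts (by omega) hok1 [] [] le_rfl (fun _ => hok2)
  have hwlt : pvW la + 10 ≤ pvW lb := by
    have := hStrict hD
    rw [pvW_nil] at this
    omega
  have hlb : lb ≠ [] := by
    intro h0; rw [h0, pvW_nil] at hwlt; omega
  have hlenB : (PySem.Chars.join [' '] lb).length + 1 = pvW lb := join_space_len lb hlb
  have hlen : (PySem.Chars.join [' '] la).length < (PySem.Chars.join [' '] lb).length := by
    by_cases hla0 : la = []
    · rw [hla0, pvW_nil] at hwlt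
      rw [hla0, PySem.Chars.join_nil]
      simp only [List.length_nil]
      omega
    · have hlenA := join_space_len la hla0
      omega
  cases hm : aMark (parts.length + 1) parts with
  | none => rw [hm] at hA; simp at hA
  | some marked =>
    rw [hm] at hA
    have hA' : aClean [] marked = some la := hA
    cases hb : bScan (parts.length + 1) [] parts with
    | none => rw [hb] at hB; simp at hB
    | some res =>
      have hres : res = lb := by rw [hb] at hB; exact Option.some.inj hB
      simp only [hm, hb, hA']
      rw [hres]
      intro heq
      have := congrArg String.toList heq
      rw [String.toList_ofList, String.toList_ofList] at this
      rw [this] at hlen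
      omega
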